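-- pv_equiv track=rewrite | github.com/Maximooch/penguin | penguin/web/routes.py | _sort_hidden_last
-- ===== SOURCE A (Python) =====
-- from typing import Any, Dict, List, Optional
--
-- def _is_hidden_path(path_value: str) -> bool:
--     """Return whether any segment is hidden (starts with '.')."""
--     normalized = path_value.replace("\\", "/").rstrip("/")
--     return any(
--         segment.startswith(".") and len(segment) > 1
--         for segment in normalized.split("/")
--         if segment
--     )
--
-- def _query_targets_hidden_paths(query: str) -> bool:
--     """Return whether the query intentionally targets hidden paths."""
--     return query.startswith(".") or "/." in query
--
-- def _sort_hidden_last(items: List[str], query: str) -> List[str]: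
--     """Sort hidden entries to the end unless query targets hidden paths."""
--     if _query_targets_hidden_paths(query):
--         return items
--
--     visible: List[str] = []
--     hidden: List[str] = []
--     for item in items:
--         if _is_hidden_path(item):
--             hidden.append(item)
--         else:
--             visible.append(item)
--     return [*visible, *hidden]
-- ===== SOURCE B (Python) =====
-- from typing import Any, Dict, List, Optional
--
-- def _sort_hidden_last(items: List[str], query: str) -> List[str]:
--     """Sort hidden entries to the end unless query targets hidden paths."""
--     if query.startswith(".") or "/." in query:
--         return items
--
--     def looks_hidden(path: str) -> bool:
--         # A segment is hidden iff a '.' sits at a segment start and is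
--         # followed by at least one more character of that segment.
--         s = path.replace("\\", "/")
--         prev = None
--         while s:
--             ch, s = s[0], s[1:]
--             if ch == "." and (prev is None or prev == "/") and s and s[0] != "/":
--                 return True
--             prev = ch
--         return False
--
--     hidden = [x for x in items if looks_hidden(x)]
--     return [x for x in items if not looks_hidden(x)] + hidden
-- ===== Notes on version B (the rewrite author's own statement) =====
-- stated objective: alternative
-- what changed: The split/rstrip-based hidden-segment predicate is replaced by a single character scan tracking the previous character (a '.' at a segment start followed by a non-'/' character), and the single-pass two-bucket partition loop is replaced by two filter comprehensions concatenated visible-first.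
import Mathlib
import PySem

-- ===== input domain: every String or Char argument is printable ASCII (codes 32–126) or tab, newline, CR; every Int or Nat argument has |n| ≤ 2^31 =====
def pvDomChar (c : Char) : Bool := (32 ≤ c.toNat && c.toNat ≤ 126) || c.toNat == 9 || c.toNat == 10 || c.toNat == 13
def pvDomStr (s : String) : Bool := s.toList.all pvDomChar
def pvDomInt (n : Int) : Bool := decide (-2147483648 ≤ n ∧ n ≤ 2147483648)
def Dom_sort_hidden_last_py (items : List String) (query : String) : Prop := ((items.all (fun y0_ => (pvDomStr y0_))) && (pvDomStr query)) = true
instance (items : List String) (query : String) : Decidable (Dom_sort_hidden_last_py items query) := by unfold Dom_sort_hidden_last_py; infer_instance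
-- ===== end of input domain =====

-- B replaces A's split/rstrip hidden-segment predicate by one character scan tracking the
-- previous character, and A's single-pass two-bucket partition loop by two filter passes
-- concatenated visible-first (alternative decomposition; same cost).

-- ===== PORT A =====
-- helper _is_hidden_path.
-- rstrip("/") has no PySem primitive: ported by hand as reverse/dropWhile '/'/reverse — exact,
-- it removes exactly the trailing '/' characters.
def pvIsHiddenPath (path_value : String) : Bool :=
  let normalized : List Char :=
    ((PySem.Str.replace path_value "\\" "/").toList.reverse.dropWhile (fun c => c == '/')).reverse
  ((PySem.Chars.splitOn normalized ['/']).filter (fun seg => !seg.isEmpty)).any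
    (fun seg => PySem.Chars.startswith seg ['.'] && seg.length > 1)

-- helper _query_targets_hidden_paths
def pvQueryTargetsHidden (query : String) : Bool :=
  PySem.Str.startswith query "." || PySem.Str.isIn "/." query

def sort_hidden_last_py (items : List String) (query : String) : List String :=
  if pvQueryTargetsHidden query then items
  else
    let vh := items.foldl
      (fun (acc : List String × List String) item =>
        if pvIsHiddenPath item then (acc.1, acc.2 ++ [item]) else (acc.1 ++ [item], acc.2))
      ([], [])
    vh.1 ++ vh.2

-- ===== PORT B =====
-- Source B's while-loop over the string's characters, carrying the previous character
-- (prev = none before the first character); ported by hand, step for step: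
-- "ch == '.' and (prev is None or prev == '/') and s and s[0] != '/'".
def pvLooksHiddenGo : Option Char → List Char → Bool
  | _, [] => false
  | prev, ch :: rest =>
    if ch == '.' && (prev == none || prev == some '/')
        && (match rest with | [] => false | d :: _ => d != '/') then true
    else pvLooksHiddenGo (some ch) rest

def pvLooksHidden (path : String) : Bool :=
  pvLooksHiddenGo none (PySem.Str.replace path "\\" "/").toList

def sort_hidden_last_py_alt (items : List String) (query : String) : List String :=
  if PySem.Str.startswith query "." || PySem.Str.isIn "/." query then items
  else
    let hidden := items.filter (fun x => pvLooksHidden x)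
    (items.filter (fun x => !pvLooksHidden x)) ++ hidden

-- ===== PRECONDITION & SPEC =====
def Spec_sort_hidden_last_py (items : List String) (query : String) (out : List String) : Prop := out = sort_hidden_last_py_alt items query
instance (items : List String) (query : String) (out : List String) : Decidable (Spec_sort_hidden_last_py items query out) := by unfold Spec_sort_hidden_last_py; infer_instance

-- ===== CLAIM (what is proved, stated in full; the proofs are below) =====
def Claim_equal_sort_hidden_last_py : Prop := ∀ (items : List String) (query : String), Dom_sort_hidden_last_py items query → Spec_sort_hidden_last_py items query (sort_hidden_last_py items query)

-- ===== LEMMAS AND PROOFS =====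

-- Clean structural model of splitOn with separator ['/'].
def pvMySplit : List Char → List (List Char)
  | [] => [[]]
  | c :: r =>
    if c = '/' then [] :: pvMySplit r
    else (c :: (pvMySplit r).headI) :: (pvMySplit r).tail

theorem pvMySplit_ne_nil (l : List Char) : pvMySplit l ≠ [] := by
  cases l with
  | nil => simp [pvMySplit]
  | cons c r => by_cases h : c = '/' <;> simp [pvMySplit, h]

theorem splitOn_go_eq (fuel : Nat) (l cur : List Char) (acc : List (List Char))
    (h : l.length < fuel) :
    PySem.Chars.splitOn.go ['/'] fuel l cur acc
      = acc.reverse ++ (cur.reverse ++ (pvMySplit l).headI) :: (pvMySplit l).tail := by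
  induction fuel generalizing l cur acc with
  | zero => omega
  | succ fuel ih =>
    cases l with
    | nil => simp [PySem.Chars.splitOn.go, pvMySplit]
    | cons c r =>
      by_cases hc : c = '/'
      · subst hc
        have hp : (['/'] : List Char).isPrefixOf ('/' :: r) = true := by
          simp [List.isPrefixOf]
        rw [PySem.Chars.splitOn.go]
        simp only [hp, if_true]
        have hdrop : List.drop (['/'] : List Char).length ('/' :: r) = r := by simp
        rw [hdrop]
        rw [ih r [] (cur.reverse :: acc)
          (by simp only [List.length_cons] at h; omega)]
        simp only [pvMySplit, if_pos]
        cases hr : pvMySplit r with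
        | nil => exact absurd hr (pvMySplit_ne_nil r)
        | cons a t => simp
      · have hp : (['/'] : List Char).isPrefixOf (c :: r) = false := by
          simp [List.isPrefixOf]
          exact fun hcc => hc hcc.symm
        rw [PySem.Chars.splitOn.go]
        simp only [hp, Bool.false_eq_true, if_false]
        rw [ih r (c :: cur) acc
          (by simp only [List.length_cons] at h; omega)]
        simp [pvMySplit, hc]

theorem splitOn_eq_mySplit (l : List Char) :
    PySem.Chars.splitOn l ['/'] = pvMySplit l := by
  unfold PySem.Chars.splitOn
  rw [splitOn_go_eq (l.length + 1) l [] [] (by omega)]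
  simp
  cases hr : pvMySplit l with
  | nil => exact absurd hr (pvMySplit_ne_nil l)
  | cons a t => simp

-- The segment predicate used on both sides of the proof.
def pvSegP (seg : List Char) : Bool :=
  PySem.Chars.startswith seg ['.'] && seg.length > 1

-- Appending a trailing '/' appends an empty segment.
theorem mySplit_append_slash (l : List Char) :
    pvMySplit (l ++ ['/']) = pvMySplit l ++ [[]] := by
  induction l with
  | nil => simp [pvMySplit]
  | cons c r ih =>
    by_cases hc : c = '/'
    · simp [pvMySplit, hc, ih]
    · simp only [List.cons_append, pvMySplit, hc, if_false, ih]
      have hne := pvMySplit_ne_nil r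
      cases hr : pvMySplit r with
      | nil => exact absurd hr hne
      | cons a t => simp

-- Trailing slashes do not change the nonempty segments.
theorem mySplit_filter_append_slashes (k : Nat) (l : List Char) :
    (pvMySplit (l ++ List.replicate k '/')).filter (fun s => !s.isEmpty)
      = (pvMySplit l).filter (fun s => !s.isEmpty) := by
  induction k with
  | zero => simp
  | succ k ih =>
    have : l ++ List.replicate (k + 1) '/' = (l ++ List.replicate k '/') ++ ['/'] := by
      simp [List.replicate_succ']
    rw [this, mySplit_append_slash, List.filter_append, ih]
    simp

-- Any list is its slash-rstripped core plus trailing slashes.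
theorem rstrip_decomp (l : List Char) :
    l = (l.reverse.dropWhile (fun c => c == '/')).reverse
        ++ List.replicate (l.reverse.takeWhile (fun c => c == '/')).length '/' := by
  have htw : l.reverse.takeWhile (fun c => c == '/')
      = List.replicate (l.reverse.takeWhile (fun c => c == '/')).length '/' := by
    apply List.eq_replicate_of_mem
    intro b hb
    have := List.mem_takeWhile_imp hb
    simpa using this
  conv_lhs => rw [← l.reverse_reverse, ← List.takeWhile_append_dropWhile
      (p := fun c => c == '/') (l := l.reverse)]
  rw [List.reverse_append]
  congr 1
  rw [htw]
  simp [List.reverse_replicate]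

-- A's split-based test over the rstripped string equals the same test without rstrip.
theorem isHidden_eq_any (path : String) :
    pvIsHiddenPath path
      = ((pvMySplit (PySem.Str.replace path "\\" "/").toList).filter
          (fun s => !s.isEmpty)).any pvSegP := by
  unfold pvIsHiddenPath
  simp only [splitOn_eq_mySplit]
  conv_rhs => rw [rstrip_decomp (PySem.Str.replace path "\\" "/").toList]
  rw [mySplit_filter_append_slashes]
  simp [pvSegP]

-- The scan, characterised against the segment list: at a segment start (prev = none
-- or '/') it computes any-over-all-segments; mid-segment it skips the current one.
theorem pvLooksHiddenGo_nil (prev : Option Char) : pvLooksHiddenGo prev [] = false := rfl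

theorem pvLooksHiddenGo_cons (prev : Option Char) (ch : Char) (rest : List Char) :
    pvLooksHiddenGo prev (ch :: rest)
      = if ch == '.' && (prev == none || prev == some '/')
            && (match rest with | [] => false | d :: _ => d != '/') then true
        else pvLooksHiddenGo (some ch) rest := rfl

theorem looksHiddenGo_eq (l : List Char) (prev : Option Char) :
    pvLooksHiddenGo prev l
      = if prev = none ∨ prev = some '/' then (pvMySplit l).any pvSegP
        else ((pvMySplit l).tail).any pvSegP := by
  induction l generalizing prev with
  | nil =>
    rw [pvLooksHiddenGo_nil]
    split <;> simp [pvMySplit, pvSegP, PySem.Chars.startswith]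
  | cons c rest ih =>
    by_cases hc : c = '/'
    · subst hc
      rw [pvLooksHiddenGo_cons]
      simp only [show ('/' == '.') = false by decide, Bool.false_and, Bool.false_eq_true,
        if_false]
      rw [ih (some '/')]
      simp [pvMySplit, pvSegP]
    · have hhead : ∀ r : List Char, (pvMySplit (c :: r)) = (c :: (pvMySplit r).headI) :: (pvMySplit r).tail := by
        intro r; simp [pvMySplit, hc]
      by_cases hdot : c = '.'
      · subst hdot
        rw [pvLooksHiddenGo_cons, ih (some '.')]
        have hmid : ¬ (some '.' = none ∨ some '.' = some '/') := by simp
        rw [if_neg hmid]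
        by_cases hstart : prev = none ∨ prev = some '/'
        · rw [if_pos hstart]
          have hpb : (prev == none || prev == some '/') = true := by
            rcases hstart with h | h <;> simp [h]
          cases rest with
          | nil =>
            simp [pvMySplit, pvSegP, PySem.Chars.startswith]
          | cons d r' =>
            by_cases hd : d = '/'
            · subst hd
              simp only [hpb, show ('.' == '.') = true by decide, Bool.true_and,
                show (('/' : Char) != '/') = false by decide, Bool.and_false,
                Bool.false_eq_true, if_false]
              rw [hhead ('/' :: r')]
              have : pvMySplit ('/' :: r') = [] :: pvMySplit r' := by simp [pvMySplit]
              rw [this]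
              simp [pvSegP, PySem.Chars.startswith]
            · simp only [hpb, show ('.' == '.') = true by decide, Bool.true_and,
                show (d != '/') = (true : Bool) by simp [hd], if_true]
              rw [hhead (d :: r')]
              have h2 : pvMySplit (d :: r') = (d :: (pvMySplit r').headI) :: (pvMySplit r').tail := by
                simp [pvMySplit, hd]
              rw [h2]
              simp [pvSegP, PySem.Chars.startswith, List.isPrefixOf]
        · rw [if_neg hstart]
          have hpb : (prev == none || prev == some '/') = false := by
            cases prev with
            | none => simp at hstart
            | some p =>
              have : p ≠ '/' := by intro h; exact hstart (Or.inr (by simp [h]))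
              simp [this]
          simp only [hpb, Bool.and_false, Bool.false_and, Bool.false_eq_true, if_false]
          rw [hhead rest]
          simp
      · rw [pvLooksHiddenGo_cons, ih (some c)]
        have : (c == '.') = false := by simp [hdot]
        simp only [this, Bool.false_and, Bool.false_eq_true, if_false]
        have hmid : ¬ (some c = none ∨ some c = some '/') := by simp [hc]
        rw [if_neg hmid, hhead rest]
        by_cases hstart : prev = none ∨ prev = some '/'
        · rw [if_pos hstart]
          have : pvSegP (c :: (pvMySplit rest).headI) = false := by
            simp [pvSegP, PySem.Chars.startswith, List.isPrefixOf]
            exact fun h => absurd h.symm hdot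
          simp [this]
        · rw [if_neg hstart]
          simp

-- The two hidden-path predicates agree.
theorem looksHidden_eq_isHidden (path : String) :
    pvLooksHidden path = pvIsHiddenPath path := by
  rw [isHidden_eq_any]
  unfold pvLooksHidden
  rw [looksHiddenGo_eq, if_pos (Or.inl rfl)]
  rw [List.any_filter]
  congr 1
  funext seg
  cases seg with
  | nil => simp [pvSegP, PySem.Chars.startswith, List.isPrefixOf]
  | cons a t => simp

-- A's partition fold computes the two filters.
theorem partition_foldl (key : String → Bool) (xs vis hid : List String) :
    xs.foldl
        (fun (acc : List String × List String) item =>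
          if key item then (acc.1, acc.2 ++ [item]) else (acc.1 ++ [item], acc.2))
        (vis, hid)
      = (vis ++ xs.filter (fun x => !key x), hid ++ xs.filter (fun x => key x)) := by
  induction xs generalizing vis hid with
  | nil => simp
  | cons x xs ih =>
    simp only [List.foldl_cons]
    cases hxk : key x with
    | false => simp [hxk, ih]
    | true => simp [hxk, ih]

-- ===== VERDICT (by name: the statement is the Claim_ definition above) =====
theorem sort_hidden_last_py_spec : Claim_equal_sort_hidden_last_py := by
  intro items query _
  unfold Spec_sort_hidden_last_py sort_hidden_last_py sort_hidden_last_py_alt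
  by_cases hq : pvQueryTargetsHidden query = true
  · have hq' : (PySem.Str.startswith query "." || PySem.Str.isIn "/." query) = true := hq
    rw [if_pos hq, if_pos hq']
  · have hq' : ¬ (PySem.Str.startswith query "." || PySem.Str.isIn "/." query) = true := hq
    rw [if_neg hq, if_neg hq']
    simp only [looksHidden_eq_isHidden]
    rw [partition_foldl pvIsHiddenPath items [] []]
    simp
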